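-- pv_equiv track=rewrite | github.com/kmh03214/Algorithm | python/Backjoon/boj_17140_이차원 배열과 연산.py | oper
-- ===== SOURCE A (Python) =====
-- def oper(lis):
--     num_cnt = [[i,0] for i in range(101)] # 최대길이 100이라 100이상 숫자갯수가 안나옴
--     for i in range(len(lis)):
--         num_cnt[lis[i]][1] += 1
--     num_cnt.sort(key = lambda x: (x[1],x[0]))
--     s = []
--     for i in num_cnt:
--         if i[0] == 0:
--             continue
--         if i[1] != 0:
--             s.append(i[0])
--             s.append(i[1])
--     return s
-- ===== SOURCE B (Python) =====
-- def oper(lis):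
--     cnt = [0] * 101
--     for x in lis:
--         cnt[x] += 1
--     s = []
--     for c in range(1, len(lis) + 1):
--         for v in range(1, 101):
--             if cnt[v] == c:
--                 s.append(v)
--                 s.append(c)
--     return s
-- ===== Notes on version B (the rewrite author's own statement) =====
-- stated objective: alternative
-- what changed: B drops A's table of [value,count] pairs and its comparison sort by (count,value): it counts into a plain 101-slot array and emits the result by directly enumerating the (count 1..len(lis), value 1..100) grid in lexicographic order, so no sort happens at all.
import Mathlib
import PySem

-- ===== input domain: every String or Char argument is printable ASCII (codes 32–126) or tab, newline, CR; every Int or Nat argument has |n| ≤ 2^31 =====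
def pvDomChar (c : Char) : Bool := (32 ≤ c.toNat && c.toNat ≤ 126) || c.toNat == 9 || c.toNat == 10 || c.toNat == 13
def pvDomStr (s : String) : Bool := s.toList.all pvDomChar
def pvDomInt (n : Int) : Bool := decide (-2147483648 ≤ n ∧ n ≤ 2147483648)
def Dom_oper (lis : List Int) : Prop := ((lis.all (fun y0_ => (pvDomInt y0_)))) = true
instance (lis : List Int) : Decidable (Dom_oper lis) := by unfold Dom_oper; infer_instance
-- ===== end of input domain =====

-- B drops A's pair table and its comparison sort of (value,count) pairs: it counts into a plain
-- 101-slot array and emits the answer by enumerating the (count 1..len, value 1..100) grid in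
-- lexicographic order — no sort at all (objective: alternative; not claimed faster).

-- ===== PORT A =====
-- num_cnt[lis[i]][1] += 1 : resolve the (possibly negative) Python index, then update in place
def operStep (nc : List (Int × Int)) (x : Int) : List (Int × Int) :=
  match PySem.List.pyIdx? nc.length x with
  | none => nc          -- Python raises IndexError here (outside Pre_oper)
  | some j =>
    match nc[j]? with
    | none => nc        -- unreachable: pyIdx? guarantees j < nc.length
    | some p => nc.set j (p.1, p.2 + 1)

def oper (lis : List Int) : List Int :=
  let numCnt0 : List (Int × Int) := (PySem.List.pyRange 0 101).map (fun i => (i, (0 : Int)))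
  let numCnt := (PySem.List.pyRange 0 (PySem.List.len lis)).foldl
    (fun nc i =>
      match PySem.List.pyGet? lis i with
      | none => nc      -- unreachable: i ∈ range(len(lis))
      | some x => operStep nc x) numCnt0
  let sortedCnt := PySem.List.sorted2 numCnt (fun x => x.2) (fun x => x.1)
  sortedCnt.foldl (fun s p => if p.1 = 0 then s else if p.2 ≠ 0 then s ++ [p.1, p.2] else s) []

-- ===== PORT B =====
-- cnt[x] += 1 : the same Python direct-indexing update on a plain list of ints
def operAltStep (cnt : List Int) (x : Int) : List Int :=
  match PySem.List.pyIdx? cnt.length x with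
  | none => cnt         -- Python raises IndexError here (outside Pre_oper)
  | some j =>
    match cnt[j]? with
    | none => cnt       -- unreachable: pyIdx? guarantees j < cnt.length
    | some m => cnt.set j (m + 1)

def oper_alt (lis : List Int) : List Int :=
  let cnt := lis.foldl operAltStep (PySem.List.pyRepeat [(0 : Int)] 101)
  (PySem.List.pyRange 1 (PySem.List.len lis + 1)).foldl
    (fun s c =>
      (PySem.List.pyRange 1 101).foldl
        (fun s v =>
          match PySem.List.pyGet? cnt v with
          | none => s   -- unreachable: v ∈ range(1, 101)
          | some m => if m = c then s ++ [v, c] else s) s) []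

-- ===== PRECONDITION & SPEC =====
-- Pre_ excludes exactly the inputs on which A raises (IndexError from num_cnt[x] when some
-- element is above 100 or below -101); B raises there too.
def Pre_oper (lis : List Int) : Prop := ∀ x ∈ lis, -101 ≤ x ∧ x ≤ 100
instance (lis : List Int) : Decidable (Pre_oper lis) := by unfold Pre_oper; infer_instance
def pvWitness_oper : List Int := [1, 2, 2, 0, -1, 100]

def Spec_oper (lis : List Int) (out : List Int) : Prop := out = oper_alt lis
instance (lis : List Int) (out : List Int) : Decidable (Spec_oper lis out) := by unfold Spec_oper; infer_instance

-- ===== CLAIM (what is proved, stated in full; the proofs are below) =====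
def Claim_equal_oper : Prop := ∀ (lis : List Int), Dom_oper lis → Pre_oper lis → Spec_oper lis (oper lis)

-- ===== LEMMAS AND PROOFS =====

-- Python's index resolution on a 101-slot list: x < 0 reaches slot x + 101
def wrapF (x : Int) : Int := if 0 ≤ x then x else x + 101

-- the multiplicity both programs accumulate in slot v (0..100)
def cntW (lis : List Int) : Int → Int := fun v => ((lis.map wrapF).count v : Int)

lemma wrapF_bounds (x : Int) (h0 : -101 ≤ x) (h1 : x ≤ 100) :
    0 ≤ wrapF x ∧ wrapF x ≤ 100 := by
  unfold wrapF
  split <;> omega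

lemma pyIdx?_101 (x : Int) (h0 : -101 ≤ x) (h1 : x ≤ 100) :
    PySem.List.pyIdx? 101 x = some (wrapF x).toNat := by
  by_cases hx : 0 ≤ x
  · simp only [wrapF, if_pos hx, PySem.List.pyIdx?]
    rw [if_pos (by push_cast; omega : x < ((101 : ℕ) : ℤ))]
  · simp only [wrapF, if_neg hx, PySem.List.pyIdx?]
    rw [if_pos (by push_cast; omega : -((101 : ℕ) : ℤ) ≤ x)]
    congr 1
    omega

-- A's table, as a function of the per-slot count g
def tableL (g : Int → Int) : List (Int × Int) := (PySem.List.pyRange 0 101).map (fun v => (v, g v))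

-- B's table, same slots, bare counts
def tableI (g : Int → Int) : List Int := (PySem.List.pyRange 0 101).map (fun v => g v)

lemma length_tableL (g : Int → Int) : (tableL g).length = 101 := by
  simp [tableL, PySem.List.length_pyRange_one]

lemma length_tableI (g : Int → Int) : (tableI g).length = 101 := by
  simp [tableI, PySem.List.length_pyRange_one]

lemma tableL_congr (g₁ g₂ : Int → Int) (h : ∀ v, g₁ v = g₂ v) : tableL g₁ = tableL g₂ := by
  unfold tableL
  exact List.map_congr_left (fun v _ => by rw [h])

lemma tableI_congr (g₁ g₂ : Int → Int) (h : ∀ v, g₁ v = g₂ v) : tableI g₁ = tableI g₂ := by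
  unfold tableI
  exact List.map_congr_left (fun v _ => by rw [h])

lemma operStep_tableL (g : Int → Int) (x : Int) (hx0 : -101 ≤ x) (hx1 : x ≤ 100) :
    operStep (tableL g) x = tableL (fun v => if v = wrapF x then g v + 1 else g v) := by
  obtain ⟨hw0, hw1⟩ := wrapF_bounds x hx0 hx1
  have hidx : PySem.List.pyIdx? (tableL g).length x = some (wrapF x).toNat := by
    rw [length_tableL]
    exact pyIdx?_101 x hx0 hx1
  have hget : (tableL g)[(wrapF x).toNat]? = some ((((wrapF x).toNat : Int)), g ((wrapF x).toNat : Int)) := by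
    simp [tableL, List.getElem?_map, PySem.List.getElem?_pyRange_one]
    omega
  rw [operStep, hidx]
  simp only [hget]
  apply List.ext_getElem
  · simp [length_tableL]
  · intro j hj hj'
    have hj101 : j < 101 := by simpa [length_tableL] using hj'
    simp only [List.getElem_set, tableL, List.getElem_map, PySem.List.getElem_pyRange_one]
    have hcast : (((wrapF x).toNat : ℤ)) = wrapF x := Int.toNat_of_nonneg hw0
    by_cases hje : (wrapF x).toNat = j
    · subst hje
      simp [hcast]
    · simp only [if_neg hje]
      have hne : ¬ ((j : Int) = wrapF x) := by omega
      simp [hne]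

lemma operAltStep_tableI (g : Int → Int) (x : Int) (hx0 : -101 ≤ x) (hx1 : x ≤ 100) :
    operAltStep (tableI g) x = tableI (fun v => if v = wrapF x then g v + 1 else g v) := by
  obtain ⟨hw0, hw1⟩ := wrapF_bounds x hx0 hx1
  have hidx : PySem.List.pyIdx? (tableI g).length x = some (wrapF x).toNat := by
    rw [length_tableI]
    exact pyIdx?_101 x hx0 hx1
  have hget : (tableI g)[(wrapF x).toNat]? = some (g ((wrapF x).toNat : Int)) := by
    simp [tableI, List.getElem?_map, PySem.List.getElem?_pyRange_one]
    omega
  rw [operAltStep, hidx]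
  simp only [hget]
  apply List.ext_getElem
  · simp [length_tableI]
  · intro j hj hj'
    have hj101 : j < 101 := by simpa [length_tableI] using hj'
    simp only [List.getElem_set, tableI, List.getElem_map, PySem.List.getElem_pyRange_one]
    have hcast : (((wrapF x).toNat : ℤ)) = wrapF x := Int.toNat_of_nonneg hw0
    by_cases hje : (wrapF x).toNat = j
    · subst hje
      simp [hcast]
    · simp only [if_neg hje]
      have hne : ¬ ((j : Int) = wrapF x) := by omega
      simp [hne]

lemma count_fold (lis : List Int) (g : Int → Int) (h : ∀ x ∈ lis, -101 ≤ x ∧ x ≤ 100) :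
    lis.foldl operStep (tableL g) = tableL (fun v => g v + ((lis.map wrapF).count v : Int)) := by
  induction lis generalizing g with
  | nil =>
    simp only [List.foldl_nil]
    exact tableL_congr _ _ (fun v => by simp)
  | cons x t ih =>
    rcases h x (List.mem_cons_self) with ⟨hx0, hx1⟩
    rw [List.foldl_cons, operStep_tableL g x hx0 hx1,
      ih _ (fun y hy => h y (List.mem_cons_of_mem _ hy))]
    apply tableL_congr
    intro v
    by_cases hvx : v = wrapF x
    · subst hvx
      rw [if_pos rfl, List.map_cons, List.count_cons_self]
      push_cast
      ring
    · rw [if_neg hvx, List.map_cons]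
      simp [Ne.symm hvx]

lemma count_fold_alt (lis : List Int) (g : Int → Int) (h : ∀ x ∈ lis, -101 ≤ x ∧ x ≤ 100) :
    lis.foldl operAltStep (tableI g) = tableI (fun v => g v + ((lis.map wrapF).count v : Int)) := by
  induction lis generalizing g with
  | nil =>
    simp only [List.foldl_nil]
    exact tableI_congr _ _ (fun v => by simp)
  | cons x t ih =>
    rcases h x (List.mem_cons_self) with ⟨hx0, hx1⟩
    rw [List.foldl_cons, operAltStep_tableI g x hx0 hx1,
      ih _ (fun y hy => h y (List.mem_cons_of_mem _ hy))]
    apply tableI_congr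
    intro v
    by_cases hvx : v = wrapF x
    · subst hvx
      rw [if_pos rfl, List.map_cons, List.count_cons_self]
      push_cast
      ring
    · rw [if_neg hvx, List.map_cons]
      simp [Ne.symm hvx]

lemma oper_numCnt (lis : List Int) (h : ∀ x ∈ lis, -101 ≤ x ∧ x ≤ 100) :
    (PySem.List.pyRange 0 (PySem.List.len lis)).foldl
      (fun nc i =>
        match PySem.List.pyGet? lis i with
        | none => nc
        | some x => operStep nc x) (tableL (fun _ => 0)) = tableL (cntW lis) := by
  have hcongr : (PySem.List.pyRange 0 (PySem.List.len lis)).foldl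
      (fun nc i =>
        match PySem.List.pyGet? lis i with
        | none => nc
        | some x => operStep nc x) (tableL (fun _ => 0))
      = (PySem.List.pyRange 0 (PySem.List.len lis)).foldl
        (fun nc i => operStep nc (PySem.List.pyGetD lis i 0)) (tableL (fun _ => 0)) := by
    apply PySem.List.foldl_congr_mem
    intro acc i hi
    rw [PySem.List.mem_pyRange_one] at hi
    obtain ⟨hi0, hi1⟩ := hi
    have hlen : i.toNat < lis.length := by simp [PySem.List.len] at hi1; omega
    have hg : PySem.List.pyGet? lis i = some lis[i.toNat] := by
      have h2 := PySem.List.pyGet?_natCast lis i.toNat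
      rw [Int.toNat_of_nonneg hi0] at h2
      rw [h2, List.getElem?_eq_getElem hlen]
    rw [hg]
    simp [PySem.List.pyGetD, hg]
  rw [hcongr, PySem.List.foldl_pyRange_pyGetD lis 0 operStep _ le_rfl]
  simp only [Int.toNat_zero, List.drop_zero]
  rw [count_fold lis _ h]
  exact tableL_congr _ _ (fun v => by simp [cntW])

def lexKey (p : Int × Int) : Lex (Int × Int) := toLex (p.2, p.1)

lemma sorted2_eq_sorted_lex (xs : List (Int × Int)) :
    PySem.List.sorted2 xs (fun p => p.2) (fun p => p.1) = PySem.List.sorted xs lexKey := by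
  have hb : (fun (a b : Int × Int) => decide (a.2 < b.2) || (!decide (b.2 < a.2) && decide (a.1 < b.1)))
      = fun a b => decide (lexKey a < lexKey b) := by
    funext a b
    by_cases h1 : a.2 < b.2 <;> by_cases h2 : b.2 < a.2 <;> by_cases h3 : a.1 < b.1 <;>
      simp [lexKey, Prod.Lex.lt_iff, h1, h2, h3] <;> omega
  simp only [PySem.List.sorted2, PySem.List.sorted]
  rw [hb]
  simp

def tgtL (n : Int) (g : Int → Int) : List (Int × Int) :=
  (PySem.List.pyRange 0 (n + 1)).flatMap
    (fun c => (PySem.List.pyRange 0 101).flatMap (fun v => if g v = c then [(v, c)] else []))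

lemma mem_tgtL (n : Int) (g : Int → Int) (p : Int × Int) :
    p ∈ tgtL n g ↔ (0 ≤ p.2 ∧ p.2 < n + 1 ∧ 0 ≤ p.1 ∧ p.1 < 101 ∧ g p.1 = p.2) := by
  unfold tgtL
  simp only [List.mem_flatMap, PySem.List.mem_pyRange_one]
  constructor
  · rintro ⟨c, ⟨hc0, hc1⟩, v, ⟨hv0, hv1⟩, hmem⟩
    by_cases hgv : g v = c
    · rw [if_pos hgv] at hmem
      simp at hmem
      subst hmem
      exact ⟨hc0, hc1, hv0, hv1, hgv⟩
    · rw [if_neg hgv] at hmem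
      simp at hmem
  · rintro ⟨hc0, hc1, hv0, hv1, hgv⟩
    exact ⟨p.2, ⟨hc0, hc1⟩, p.1, ⟨hv0, hv1⟩, by rw [if_pos hgv]; simp⟩

lemma pairwise_tgtL (n : Int) (g : Int → Int) :
    (tgtL n g).Pairwise (fun a b => lexKey a < lexKey b) := by
  unfold tgtL
  rw [List.pairwise_flatMap]
  constructor
  · intro c _
    rw [List.pairwise_flatMap]
    constructor
    · intro v _
      split <;> simp
    · apply (PySem.List.pairwise_lt_pyRange_one 0 101).imp
      intro v w hvw x hx y hy
      have hx' : x = (v, c) ∧ g v = c := by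
        by_cases h : g v = c
        · rw [if_pos h] at hx; simp at hx; exact ⟨hx, h⟩
        · rw [if_neg h] at hx; simp at hx
      have hy' : y = (w, c) ∧ g w = c := by
        by_cases h : g w = c
        · rw [if_pos h] at hy; simp at hy; exact ⟨hy, h⟩
        · rw [if_neg h] at hy; simp at hy
      rw [hx'.1, hy'.1]
      simp [lexKey, Prod.Lex.lt_iff]
      omega
  · apply (PySem.List.pairwise_lt_pyRange_one 0 (n + 1)).imp
    intro c d hcd x hx y hy
    simp only [List.mem_flatMap] at hx hy
    obtain ⟨v, _, hxv⟩ := hx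
    obtain ⟨w, _, hyw⟩ := hy
    have hx2 : x.2 = c := by
      by_cases h : g v = c
      · rw [if_pos h] at hxv; simp at hxv; rw [hxv]
      · rw [if_neg h] at hxv; simp at hxv
    have hy2 : y.2 = d := by
      by_cases h : g w = d
      · rw [if_pos h] at hyw; simp at hyw; rw [hyw]
      · rw [if_neg h] at hyw; simp at hyw
    simp [lexKey, Prod.Lex.lt_iff]
    omega

lemma sorted_tableL (n : Int) (g : Int → Int)
    (h0 : ∀ v, 0 ≤ g v) (h1 : ∀ v, g v ≤ n) :
    PySem.List.sorted (tableL g) lexKey = tgtL n g := by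
  apply PySem.List.sorted_eq_of_perm_of_pairwise_lt _ _ lexKey _ (pairwise_tgtL n g)
  rw [List.perm_ext_iff_of_nodup]
  · intro p
    rw [mem_tgtL]
    unfold tableL
    simp only [List.mem_map, PySem.List.mem_pyRange_one]
    constructor
    · rintro ⟨hc0, hc1, hv0, hv1, hgv⟩
      exact ⟨p.1, ⟨hv0, hv1⟩, by rw [hgv]⟩
    · rintro ⟨v, ⟨hv0, hv1⟩, hp⟩
      subst hp
      exact ⟨h0 v, by have := h1 v; omega, hv0, hv1, rfl⟩
  · exact (pairwise_tgtL n g).imp (fun h => by intro he; subst he; exact lt_irrefl _ h)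
  · apply (PySem.List.nodup_pyRange_one 0 101).map_on
    intro v _ w _ hvw
    simpa using congrArg Prod.fst hvw

-- A's emission filter
def emitF (p : Int × Int) : List Int := if p.1 ≠ 0 ∧ p.2 ≠ 0 then [p.1, p.2] else []

lemma cntW_nonneg (lis : List Int) (v : Int) : 0 ≤ cntW lis v := by
  simp [cntW]

lemma cntW_le_len (lis : List Int) (v : Int) : cntW lis v ≤ (lis.length : Int) := by
  unfold cntW
  have := List.count_le_length (l := lis.map wrapF) (a := v)
  rw [List.length_map] at this
  exact_mod_cast this

lemma operA_flat (lis : List Int) (h : ∀ x ∈ lis, -101 ≤ x ∧ x ≤ 100) :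
    oper lis = (tgtL (lis.length : Int) (cntW lis)).flatMap emitF := by
  show (PySem.List.sorted2
      ((PySem.List.pyRange 0 (PySem.List.len lis)).foldl
        (fun nc i =>
          match PySem.List.pyGet? lis i with
          | none => nc
          | some x => operStep nc x) (tableL (fun _ => 0)))
      (fun x => x.2) (fun x => x.1)).foldl
    (fun s p => if p.1 = 0 then s else if p.2 ≠ 0 then s ++ [p.1, p.2] else s) [] = _
  rw [oper_numCnt lis h, sorted2_eq_sorted_lex,
    sorted_tableL (lis.length : Int) (cntW lis) (cntW_nonneg lis) (cntW_le_len lis)]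
  have hbody : (fun (s : List Int) (p : Int × Int) =>
        if p.1 = 0 then s else if p.2 ≠ 0 then s ++ [p.1, p.2] else s)
      = fun s p => s ++ emitF p := by
    funext s p
    unfold emitF
    split_ifs <;> simp_all
  rw [hbody, PySem.List.foldl_append_eq_flatMap]
  simp

lemma tableI_get (g : Int → Int) (v : Int) (hv0 : 0 ≤ v) (hv1 : v < 101) :
    PySem.List.pyGet? (tableI g) v = some (g v) := by
  have h2 := PySem.List.pyGet?_natCast (tableI g) v.toNat
  rw [Int.toNat_of_nonneg hv0] at h2
  rw [h2]
  have : v.toNat < (tableI g).length := by rw [length_tableI]; omega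
  rw [List.getElem?_eq_getElem this]
  simp only [tableI, List.getElem_map, PySem.List.getElem_pyRange_one]
  congr 1
  · congr 1
    omega

lemma operB_flat (lis : List Int) (h : ∀ x ∈ lis, -101 ≤ x ∧ x ≤ 100) :
    oper_alt lis = (PySem.List.pyRange 1 ((lis.length : Int) + 1)).flatMap
      (fun c => (PySem.List.pyRange 1 101).flatMap
        (fun v => if cntW lis v = c then [v, c] else [])) := by
  show (PySem.List.pyRange 1 (PySem.List.len lis + 1)).foldl
    (fun s c =>
      (PySem.List.pyRange 1 101).foldl
        (fun s v =>
          match PySem.List.pyGet? (lis.foldl operAltStep (PySem.List.pyRepeat [(0 : Int)] 101)) v with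
          | none => s
          | some m => if m = c then s ++ [v, c] else s) s) [] = _
  have hcnt0 : PySem.List.pyRepeat [(0 : Int)] 101 = tableI (fun _ => 0) := by
    rw [PySem.List.pyRepeat_singleton]
    apply List.ext_getElem
    · simp [length_tableI]
    · intro j hj hj'
      simp [tableI]
  have hcnt : lis.foldl operAltStep (PySem.List.pyRepeat [(0 : Int)] 101) = tableI (cntW lis) := by
    rw [hcnt0, count_fold_alt lis _ h]
    exact tableI_congr _ _ (fun v => by simp [cntW])
  rw [hcnt]
  have houter : (fun (s : List Int) (c : Int) =>
        (PySem.List.pyRange 1 101).foldl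
          (fun s v =>
            match PySem.List.pyGet? (tableI (cntW lis)) v with
            | none => s
            | some m => if m = c then s ++ [v, c] else s) s)
      = fun s c => s ++ (PySem.List.pyRange 1 101).flatMap (fun v => if cntW lis v = c then [v, c] else []) := by
    funext s c
    have hcongr : (PySem.List.pyRange 1 101).foldl
        (fun s v =>
          match PySem.List.pyGet? (tableI (cntW lis)) v with
          | none => s
          | some m => if m = c then s ++ [v, c] else s) s
        = (PySem.List.pyRange 1 101).foldl
          (fun s v => s ++ (if cntW lis v = c then [v, c] else [])) s := by
      apply PySem.List.foldl_congr_mem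
      intro acc v hv
      rw [PySem.List.mem_pyRange_one] at hv
      rw [tableI_get (cntW lis) v (by omega) (by omega)]
      split_ifs <;> simp_all
    rw [hcongr, PySem.List.foldl_append_eq_flatMap]
  rw [houter, PySem.List.foldl_append_eq_flatMap]
  simp [PySem.List.len]

lemma flat_eq (n : Int) (g : Int → Int) (hn : 0 ≤ n) :
    (tgtL n g).flatMap emitF
      = (PySem.List.pyRange 1 (n + 1)).flatMap
          (fun c => (PySem.List.pyRange 1 101).flatMap
            (fun v => if g v = c then [v, c] else [])) := by
  unfold tgtL
  rw [List.flatMap_assoc]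
  rw [PySem.List.pyRange_one_cons (by omega : (0 : Int) < n + 1)]
  rw [List.flatMap_cons]
  have hzero : ((PySem.List.pyRange 0 101).flatMap
      (fun v => if g v = 0 then [(v, (0 : Int))] else [])).flatMap emitF = [] := by
    rw [List.flatMap_assoc, List.flatMap_eq_nil_iff]
    intro v _
    split <;> simp [emitF]
  rw [hzero, List.nil_append]
  rw [List.flatMap]
  rw [List.flatMap]
  congr 1
  apply List.map_congr_left
  intro c hc
  rw [PySem.List.mem_pyRange_one] at hc
  rw [List.flatMap_assoc]
  rw [PySem.List.pyRange_one_cons (by omega : (0 : Int) < 101), List.flatMap_cons]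
  have hv0 : ((if g 0 = c then [((0 : Int), c)] else []) : List (Int × Int)).flatMap emitF = [] := by
    split <;> simp [emitF]
  rw [hv0, List.nil_append]
  rw [List.flatMap]
  rw [List.flatMap]
  congr 1
  apply List.map_congr_left
  intro v hv
  rw [PySem.List.mem_pyRange_one] at hv
  split
  · simp only [List.flatMap_cons, List.flatMap_nil, List.append_nil, emitF]
    rw [if_pos ⟨by omega, by omega⟩]
  · simp

-- ===== VERDICT (by name: the statement is the Claim_ definition above) =====
theorem oper_spec : Claim_equal_oper := by
  intro lis _ hpre
  show oper lis = oper_alt lis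
  rw [operA_flat lis hpre, operB_flat lis hpre,
    flat_eq (lis.length : Int) (cntW lis) (by positivity)]
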